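-- pv_equiv track=rewrite | github.com/cayao2012/ICT-bot | backtest_run.py | build_dr
-- ===== SOURCE A (Python) =====
-- def build_dr(bars):
--     """Build date range index: {date: (start_idx, end_idx)}.
--     end_idx is EXCLUSIVE (Python slice style: last_bar_idx + 1).
--     Matches ptnut_bot._build_dr and backtest_topstep.build_dr so that
--     range(ds, de) in get_liquidity_levels covers all session bars.
--     """
--     dr = {}
--     for i, bar in enumerate(bars):
--         d = bar["date"]
--         if d not in dr:
--             dr[d] = (i, i + 1)
--         else:
--             dr[d] = (dr[d][0], i + 1)
--     return dr
-- ===== SOURCE B (Python) =====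
-- def build_dr(bars):
--     dr = {}
--     for d in dict.fromkeys(bar["date"] for bar in bars):
--         first = next(i for i, b in enumerate(bars) if b["date"] == d)
--         last = next(i for i, b in reversed(list(enumerate(bars))) if b["date"] == d)
--         dr[d] = (first, last + 1)
--     return dr
-- ===== Notes on version B (the rewrite author's own statement) =====
-- stated objective: alternative
-- what changed: Instead of one pass updating a running (start,end) tuple per date in a dict, B first dedupes the dates and then for each date searches the bar list forward for its first index and backward for its last index (nested per-date scans, no running dict state).
import Mathlib
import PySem

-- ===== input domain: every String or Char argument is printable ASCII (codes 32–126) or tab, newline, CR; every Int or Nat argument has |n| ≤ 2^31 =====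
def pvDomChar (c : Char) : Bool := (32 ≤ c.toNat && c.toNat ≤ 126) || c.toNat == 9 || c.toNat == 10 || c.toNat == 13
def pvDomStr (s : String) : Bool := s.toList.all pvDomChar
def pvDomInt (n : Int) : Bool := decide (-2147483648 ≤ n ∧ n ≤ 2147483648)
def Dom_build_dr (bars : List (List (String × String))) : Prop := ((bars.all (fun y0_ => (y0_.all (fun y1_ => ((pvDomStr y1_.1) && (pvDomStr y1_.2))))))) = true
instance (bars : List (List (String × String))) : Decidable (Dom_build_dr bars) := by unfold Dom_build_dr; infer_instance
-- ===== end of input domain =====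

-- B dedupes the dates, then searches the bars forward/backward for each date's first/last index;
-- A keeps a running (start, end) pair per date in a dict. Return values proved equal under Pre_.

-- bar["date"]: first-match lookup by structural recursion (Python's KeyError case — no "date"
-- key — is excluded by Pre_build_dr, so the "" default never fires on admitted inputs).
def pvDateOf : List (String × String) → String
  | [] => ""
  | (k, v) :: r => if k == "date" then v else pvDateOf r

-- ===== PORT A =====
def build_dr (bars : List (List (String × String))) : List (String × Int × Int) :=
  ((PySem.List.enumerate bars).foldl
    (fun dr p =>
      dr.insert (pvDateOf p.2)
        (match dr.get? (pvDateOf p.2) with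
         | none => (p.1, p.1 + 1)          -- d not in dr: dr[d] = (i, i+1)
         | some q => (q.1, p.1 + 1)))      -- else: dr[d] = (dr[d][0], i+1)
    PySem.Dict.empty).items

-- ===== PORT B =====
-- dict.fromkeys(dates) = PySem.List.dedup; next(i for i,b in enumerate … if …) = find? on
-- enumerate (the generator never exhausts: d occurs); reversed(list(enumerate …)) = .reverse.
def build_dr_alt (bars : List (List (String × String))) : List (String × Int × Int) :=
  (PySem.List.dedup (bars.map pvDateOf)).map (fun d =>
    (d,
     (((PySem.List.enumerate bars).find? (fun p => pvDateOf p.2 == d)).map Prod.fst).getD 0,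
     (((PySem.List.enumerate bars).reverse.find? (fun p => pvDateOf p.2 == d)).map Prod.fst).getD 0 + 1))

-- ===== PRECONDITION & SPEC =====
-- Pre_: every bar has a "date" key; otherwise bar["date"] raises KeyError in A (and B).
def pvHasDate : List (String × String) → Bool
  | [] => false
  | (k, _) :: r => (k == "date") || pvHasDate r
def pvAllHaveDate : List (List (String × String)) → Bool
  | [] => true
  | bar :: rest => pvHasDate bar && pvAllHaveDate rest
def Pre_build_dr (bars : List (List (String × String))) : Prop :=
  pvAllHaveDate bars = true
instance (bars : List (List (String × String))) : Decidable (Pre_build_dr bars) := by unfold Pre_build_dr; infer_instance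

def pvWitness_build_dr : (List (List (String × String))) :=
  [[("date", "2024-01-01")], [("date", "2024-01-02")], [("date", "2024-01-01")]]

def Spec_build_dr (bars : List (List (String × String))) (out : List (String × Int × Int)) : Prop := out = build_dr_alt bars
instance (bars : List (List (String × String))) (out : List (String × Int × Int)) : Decidable (Spec_build_dr bars out) := by unfold Spec_build_dr; infer_instance

-- ===== CLAIM (what is proved, stated in full; the proofs are below) =====
def Claim_equal_build_dr : Prop := ∀ (bars : List (List (String × String))), Dom_build_dr bars → Pre_build_dr bars → Spec_build_dr bars (build_dr bars)

-- ===== LEMMAS AND PROOFS =====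

-- characterisation of A's loop: the final lookup at c is determined by the indices whose bar has date c
theorem A_get?_char (l : List (Int × List (String × String)))
    (dr : PySem.Dict String (Int × Int)) (c : String) :
    (l.foldl (fun dr p =>
      dr.insert (pvDateOf p.2)
        (match dr.get? (pvDateOf p.2) with
         | none => (p.1, p.1 + 1)
         | some q => (q.1, p.1 + 1))) dr).get? c =
    (if ((l.filter (fun p => pvDateOf p.2 == c)).map (fun p => p.1)) = [] then dr.get? c
     else some ((match dr.get? c with
                 | none => ((l.filter (fun p => pvDateOf p.2 == c)).map (fun p => p.1)).headD 0
                 | some q => q.1),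
                ((l.filter (fun p => pvDateOf p.2 == c)).map (fun p => p.1)).getLastD 0 + 1)) := by
  induction l generalizing dr with
  | nil => simp
  | cons p l ih =>
    rw [List.foldl_cons]
    by_cases hk : pvDateOf p.2 = c
    · subst hk
      rw [List.filter_cons_of_pos (by simp), List.map_cons, ih, PySem.Dict.get?_insert_self]
      rcases hjs : (l.filter (fun q => pvDateOf q.2 == pvDateOf p.2)).map (fun q => q.1) with _ | ⟨j, js⟩
      · rw [hjs]
        cases dr.get? (pvDateOf p.2) <;> simp
      · rw [hjs]
        obtain ⟨v, hv⟩ := Option.isSome_iff_exists.mp (List.getLast?_isSome.mpr (List.cons_ne_nil j js))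
        cases dr.get? (pvDateOf p.2) <;>
          simp [List.getLastD_eq_getLast?, hv, List.getLast?_cons_cons]
    · rw [List.filter_cons_of_neg (by simp [hk]), ih]
      simp only [PySem.Dict.get?_insert, if_neg (Ne.symm hk)]

-- find? is the head of the filter
theorem find?_eq_head?_filter {α : Type} (l : List α) (p : α → Bool) :
    l.find? p = (l.filter p).head? := by
  induction l with
  | nil => rfl
  | cons x l ih =>
    by_cases h : p x = true
    · rw [List.find?_cons_of_pos h, List.filter_cons_of_pos h, List.head?_cons]
    · rw [List.find?_cons_of_neg h, List.filter_cons_of_neg h, ih]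

-- find? on the reverse is the last match
theorem find?_reverse_eq_getLast?_filter {α : Type} (l : List α) (p : α → Bool) :
    l.reverse.find? p = (l.filter p).getLast? := by
  rw [find?_eq_head?_filter, List.filter_reverse, List.head?_reverse]

theorem build_dr_core (bars : List (List (String × String))) :
    build_dr bars = build_dr_alt bars := by
  unfold build_dr build_dr_alt
  set L := PySem.List.enumerate bars with hL
  set DA := L.foldl (fun dr p =>
      dr.insert (pvDateOf p.2)
        (match dr.get? (pvDateOf p.2) with
         | none => (p.1, p.1 + 1)
         | some q => (q.1, p.1 + 1))) PySem.Dict.empty with hDA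
  -- keys of A's dict: distinct dates in first-occurrence order
  have hKA : DA.keys = PySem.Set.update (PySem.Dict.empty (κ := String) (ν := Int × Int)).keys (L.map (fun p => pvDateOf p.2)) :=
    PySem.Dict.keys_foldl_insert_key L (fun p => pvDateOf p.2)
      (fun dr p => match dr.get? (pvDateOf p.2) with
         | none => (p.1, p.1 + 1)
         | some q => (q.1, p.1 + 1)) _
  have hmapd : L.map (fun p => pvDateOf p.2) = bars.map pvDateOf := by
    have := PySem.List.map_snd_enumerate bars 0
    calc L.map (fun p => pvDateOf p.2) = (L.map (fun p => p.2)).map pvDateOf := by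
          rw [List.map_map]; rfl
      _ = bars.map pvDateOf := by rw [hL, this]
  have hkeys : DA.keys = PySem.List.dedup (bars.map pvDateOf) := by
    rw [hKA, hmapd]
    simp [PySem.Dict.keys_empty, PySem.List.dedup_eq_ofList, PySem.Set.update,
          PySem.Set.ofList_eq_foldl]
  have hndA : DA.keys.Nodup :=
    PySem.Dict.nodup_keys_foldl_insert_key L (fun p => pvDateOf p.2) _ _ (by simp)
  rw [PySem.Dict.items_eq_map_keys DA hndA (0, 0), hkeys]
  apply List.map_congr_left
  intro k hk
  -- k is a date occurring in bars
  have hmem : k ∈ L.map (fun p => pvDateOf p.2) := by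
    rw [hmapd]
    exact (PySem.List.mem_dedup _ _).mp hk
  obtain ⟨p, hpL, hpk⟩ := List.mem_map.mp hmem
  have hfil : p ∈ L.filter (fun q => pvDateOf q.2 == k) :=
    List.mem_filter.mpr ⟨hpL, by simp [hpk]⟩
  have hne : L.filter (fun q => pvDateOf q.2 == k) ≠ [] := List.ne_nil_of_mem hfil
  have hjs : (L.filter (fun q => pvDateOf q.2 == k)).map (fun q => q.1) ≠ [] := by
    simp only [ne_eq, List.map_eq_nil_iff]; exact hne
  have hA := A_get?_char L (PySem.Dict.empty) k
  rw [if_neg hjs, PySem.Dict.get?_empty] at hA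
  simp only [hDA] at *
  rw [PySem.Dict.getD_eq_get?_getD, hA,
      find?_eq_head?_filter, find?_reverse_eq_getLast?_filter]
  -- componentwise: headD of mapped list vs mapped head?, same for getLast?
  have hv : (L.filter (fun q => pvDateOf q.2 == k)).head? =
      some ((L.filter (fun q => pvDateOf q.2 == k)).head hne) := List.head?_eq_some_head hne
  obtain ⟨w, hw⟩ := Option.isSome_iff_exists.mp (List.getLast?_isSome.mpr hne)
  simp [List.headD_eq_head?_getD, List.getLastD_eq_getLast?, List.head?_map, List.getLast?_map, hv, hw]

-- ===== VERDICT (by name: the statement is the Claim_ definition above) =====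
theorem build_dr_spec : Claim_equal_build_dr := by
  intro bars _ _
  unfold Spec_build_dr
  exact build_dr_core bars
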